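-- pv_equiv track=rewrite | github.com/abel-hak/FinalYear | backend/app/services/learner_progress_service.py | _build_statuses
-- ===== SOURCE A (Python) =====
-- def _build_statuses(ordered_quest_ids: list, completed_ids: set) -> dict:
--     statuses: dict = {}
--     previous_completed = True
--     current_assigned = False
--     for qid in ordered_quest_ids:
--         if qid in completed_ids:
--             statuses[qid] = "completed"
--         elif previous_completed and not current_assigned:
--             statuses[qid] = "current"
--             current_assigned = True
--             previous_completed = False
--         else:
--             statuses[qid] = "locked"
--             previous_completed = False
--     return statuses
-- ===== SOURCE B (Python) =====
-- def _build_statuses(ordered_quest_ids: list, completed_ids: set) -> dict: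
--     # Pass 1: find the position of the first quest not yet completed (the "current" one).
--     current_index = None
--     for i, qid in enumerate(ordered_quest_ids):
--         if qid not in completed_ids:
--             current_index = i
--             break
--     # Pass 2: map each position to its status; comparing by index keeps duplicates exact.
--     statuses: dict = {}
--     for i, qid in enumerate(ordered_quest_ids):
--         if qid in completed_ids:
--             statuses[qid] = "completed"
--         elif i == current_index:
--             statuses[qid] = "current"
--         else:
--             statuses[qid] = "locked"
--     return statuses
-- ===== Notes on version B (the rewrite author's own statement) =====
-- stated objective: simpler
-- what changed: Replaces A's single loop carrying two interacting boolean state flags by a stateless two-pass decomposition: first find the index of the first non-completed quest, then map every position directly to its status.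
import Mathlib
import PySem

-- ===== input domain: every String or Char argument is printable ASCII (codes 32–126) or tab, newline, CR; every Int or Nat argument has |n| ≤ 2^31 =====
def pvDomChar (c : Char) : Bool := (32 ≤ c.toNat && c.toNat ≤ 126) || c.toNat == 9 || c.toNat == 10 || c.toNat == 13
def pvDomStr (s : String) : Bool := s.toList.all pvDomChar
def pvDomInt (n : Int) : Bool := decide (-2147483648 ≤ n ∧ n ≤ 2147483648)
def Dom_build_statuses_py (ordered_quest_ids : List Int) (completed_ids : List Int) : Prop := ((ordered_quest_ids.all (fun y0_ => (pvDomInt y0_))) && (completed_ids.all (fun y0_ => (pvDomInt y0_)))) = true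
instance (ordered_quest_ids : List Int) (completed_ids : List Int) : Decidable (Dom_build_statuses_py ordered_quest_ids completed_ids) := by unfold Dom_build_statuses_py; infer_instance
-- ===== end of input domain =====

-- B replaces A's one loop with two interacting boolean flags by two stateless passes:
-- find the index of the first non-completed quest, then map each position to its status (objective: simpler).
-- ===== PORT A =====
-- the for-loop of A, carrying the state (statuses, previous_completed, current_assigned)
def pvLoopA (ids : List Int) (completed : List Int) (d : PySem.Dict Int String)
    (prev cur : Bool) : PySem.Dict Int String :=
  match ids with
  | [] => d
  | qid :: rest =>
    if completed.contains qid then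
      pvLoopA rest completed (d.insert qid "completed") prev cur
    else if prev && !cur then
      pvLoopA rest completed (d.insert qid "current") false true
    else
      pvLoopA rest completed (d.insert qid "locked") false cur

def build_statuses_py (ordered_quest_ids : List Int) (completed_ids : List Int) : List (Int × String) :=
  (pvLoopA ordered_quest_ids completed_ids PySem.Dict.empty true false).items

-- ===== PORT B =====
-- pass 1: index of the first quest id not in completed_ids (None if all completed)
def pvFindCurrent (ids : List Int) (completed : List Int) (i : Nat) : Option Nat :=
  match ids with
  | [] => none
  | qid :: rest =>
    if completed.contains qid then pvFindCurrent rest completed (i + 1) else some i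

-- pass 2: map each position to its status, comparing the position with current_index
def pvBuildB (ids : List Int) (completed : List Int) (ci : Option Nat) (i : Nat)
    (d : PySem.Dict Int String) : PySem.Dict Int String :=
  match ids with
  | [] => d
  | qid :: rest =>
    if completed.contains qid then
      pvBuildB rest completed ci (i + 1) (d.insert qid "completed")
    else if some i = ci then
      pvBuildB rest completed ci (i + 1) (d.insert qid "current")
    else
      pvBuildB rest completed ci (i + 1) (d.insert qid "locked")

def build_statuses_py_alt (ordered_quest_ids : List Int) (completed_ids : List Int) : List (Int × String) :=
  (pvBuildB ordered_quest_ids completed_ids (pvFindCurrent ordered_quest_ids completed_ids 0) 0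
    PySem.Dict.empty).items

-- ===== PRECONDITION & SPEC =====
def Spec_build_statuses_py (ordered_quest_ids : List Int) (completed_ids : List Int) (out : List (Int × String)) : Prop := out = build_statuses_py_alt ordered_quest_ids completed_ids
instance (ordered_quest_ids : List Int) (completed_ids : List Int) (out : List (Int × String)) : Decidable (Spec_build_statuses_py ordered_quest_ids completed_ids out) := by unfold Spec_build_statuses_py; infer_instance

-- ===== CLAIM (what is proved, stated in full; the proofs are below) =====
def Claim_equal_build_statuses_py : Prop := ∀ (ordered_quest_ids : List Int) (completed_ids : List Int), Dom_build_statuses_py ordered_quest_ids completed_ids → Spec_build_statuses_py ordered_quest_ids completed_ids (build_statuses_py ordered_quest_ids completed_ids)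

-- ===== LEMMAS AND PROOFS =====

-- After the current quest has been assigned (cur = true), A locks every later
-- non-completed quest; B does the same when the recorded index ci lies before i.
lemma loopA_done (ids completed : List Int) (ci : Option Nat) :
    ∀ (i : Nat) (d : PySem.Dict Int String), (∀ j, ci = some j → j < i) →
    pvLoopA ids completed d false true = pvBuildB ids completed ci i d := by
  induction ids with
  | nil => intro i d _; rfl
  | cons qid rest ih =>
    intro i d h
    simp only [pvLoopA, pvBuildB]
    by_cases hc : completed.contains qid
    · simp only [hc, if_true]
      exact ih (i + 1) _ (fun j hj => Nat.lt_succ_of_lt (h j hj))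
    · have hne : ¬ (some i = ci) := by
        intro he; exact absurd (h i he.symm) (Nat.lt_irrefl i)
      simp only [Bool.not_eq_true] at hc
      simp only [hc, Bool.false_eq_true, if_false, Bool.and_false, Bool.false_and,
        Bool.not_true, hne]
      exact ih (i + 1) _ (fun j hj => Nat.lt_succ_of_lt (h j hj))

-- Before the current quest is assigned (state prev = true, cur = false), A's
-- remaining loop equals B's mapping pass with ci = first non-completed index from i.
lemma loopA_pending (ids completed : List Int) :
    ∀ (i : Nat) (d : PySem.Dict Int String),
    pvLoopA ids completed d true false =
      pvBuildB ids completed (pvFindCurrent ids completed i) i d := by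
  induction ids with
  | nil => intro i d; rfl
  | cons qid rest ih =>
    intro i d
    simp only [pvLoopA, pvBuildB, pvFindCurrent]
    by_cases hc : completed.contains qid
    · simp only [hc, if_true]
      exact ih (i + 1) _
    · simp only [Bool.not_eq_true] at hc
      simp only [hc, Bool.false_eq_true, if_false, Bool.and_self, Bool.not_false,
        Bool.and_true, if_true, if_pos rfl]
      exact loopA_done rest completed (some i) (i + 1) _
        (fun j hj => by simp at hj; omega)

-- ===== VERDICT (by name: the statement is the Claim_ definition above) =====
theorem build_statuses_py_spec : Claim_equal_build_statuses_py := by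
  intro ordered completed _
  unfold Spec_build_statuses_py build_statuses_py build_statuses_py_alt
  rw [loopA_pending ordered completed 0]
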